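-- pv_equiv track=rewrite | github.com/underloki/Cyprium | kernel/crypto/text/postalbarcode.py | do_cypher
-- ===== SOURCE A (Python) =====
-- O_MAP = {'0': "⋅⋅||||",
--          '1': "⋅|⋅|||",
--          '2': "⋅||⋅||",
--          '3': "⋅|||⋅|",
--          '4': "|⋅⋅|||",
--          '5': "|⋅|⋅||",
--          '6': "|⋅||⋅|",
--          '7': "||⋅⋅||",
--          '8': "||⋅|⋅|",
--          '9': "|||⋅⋅|"}
--
-- C_MAP = {k: v.replace('⋅', ' ') for k, v in O_MAP.items()}
--
-- def do_cypher(text, m_org=True, m_cls=False, o_stght=True, o_rev=False):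
--     """Function to convert some text to postal barcode.
--        Returns a list of 1 to 4 str, based on options' values:
--            [org, reversed_org, cls, reversed_cls].
--     """
--     ret = []
--     if m_org:
--         if o_stght:
--             ret.append(" ".join((O_MAP[n] for n in text)))
--         if o_rev:
--             ret.append(" ".join((O_MAP[n] for n in reversed(text))))
--     if m_cls:
--         if o_stght:
--             ret.append(" ".join((C_MAP[n] for n in text)))
--         if o_rev:
--             ret.append(" ".join((C_MAP[n] for n in reversed(text))))
--     return ret
-- ===== SOURCE B (Python) =====
-- def do_cypher(text, m_org=True, m_cls=False, o_stght=True, o_rev=False):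
--     """Convert digit text to postal barcode strings.
--
--        No lookup table: the code for digit v is the v-th 2-combination of the
--        first five positions (combinatorial number system): two 'mark' slots at
--        positions (i, j) among six slots, the rest bars.  The closed variant is
--        the same generation with ' ' as the mark instead of '⋅'."""
--     def bars(chars, mark):
--         out = []
--         for d in chars:
--             v = int(d)
--             i = 0
--             while v >= 4 - i:
--                 v -= 4 - i
--                 i += 1
--             j = i + 1 + v
--             out.append(''.join(mark if k in (i, j) else '|' for k in range(6)))
--         return ' '.join(out)
--     ret = []
--     for mode_on, mark in ((m_org, '⋅'), (m_cls, ' ')):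
--         if mode_on:
--             if o_stght:
--                 ret.append(bars(text, mark))
--             if o_rev:
--                 ret.append(bars(reversed(text), mark))
--     return ret
-- ===== Notes on version B (the rewrite author's own statement) =====
-- stated objective: alternative
-- what changed: B drops both lookup tables entirely and generates each 6-slot code arithmetically from the digit value via the combinatorial number system (the v-th 2-combination of the first five positions gives the two mark slots), with one mark parameter producing both the original and the closed variants, and assembles the result by folding over the (flag, mark) pairs.
import Mathlib
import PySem

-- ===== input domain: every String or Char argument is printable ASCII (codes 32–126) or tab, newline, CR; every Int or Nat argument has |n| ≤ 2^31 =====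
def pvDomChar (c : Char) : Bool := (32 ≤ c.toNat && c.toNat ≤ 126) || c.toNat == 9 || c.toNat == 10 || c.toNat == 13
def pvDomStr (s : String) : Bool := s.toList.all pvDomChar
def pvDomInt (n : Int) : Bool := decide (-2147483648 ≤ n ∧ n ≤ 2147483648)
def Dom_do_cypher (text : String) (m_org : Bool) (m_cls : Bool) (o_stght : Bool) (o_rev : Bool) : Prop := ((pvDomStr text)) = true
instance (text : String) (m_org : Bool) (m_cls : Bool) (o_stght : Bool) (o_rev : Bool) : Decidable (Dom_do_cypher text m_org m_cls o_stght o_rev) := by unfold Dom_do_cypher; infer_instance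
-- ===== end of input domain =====

-- B generates each 6-slot code arithmetically (combinatorial number system: the
-- v-th 2-combination of five positions) instead of A's lookup tables: alternative algorithm.

-- ===== PORT A =====
-- O_MAP (keys are the single digit characters)
def pvOMap : PySem.Dict Char String := PySem.Dict.ofList
  [('0', "⋅⋅||||"), ('1', "⋅|⋅|||"), ('2', "⋅||⋅||"), ('3', "⋅|||⋅|"), ('4', "|⋅⋅|||"),
   ('5', "|⋅|⋅||"), ('6', "|⋅||⋅|"), ('7', "||⋅⋅||"), ('8', "||⋅|⋅|"), ('9', "|||⋅⋅|")]

-- C_MAP = {k: v.replace('⋅', ' ') for k, v in O_MAP.items()}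
def pvCMap : PySem.Dict Char String :=
  PySem.Dict.ofList (pvOMap.items.map (fun kv => (kv.1, PySem.Str.replace kv.2 "⋅" " ")))

-- O_MAP[n] raises KeyError on a non-digit; the port uses getD "" — exact on Pre_
-- (every character looked up is a digit there).
def do_cypher (text : String) (m_org : Bool) (m_cls : Bool) (o_stght : Bool) (o_rev : Bool) : List String :=
  let ret : List String := []
  let ret := if m_org then
      let ret := if o_stght then
          ret ++ [PySem.Str.join " " (text.toList.map (fun n => pvOMap.getD n ""))] else ret
      if o_rev then
          ret ++ [PySem.Str.join " " (text.toList.reverse.map (fun n => pvOMap.getD n ""))] else ret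
    else ret
  let ret := if m_cls then
      let ret := if o_stght then
          ret ++ [PySem.Str.join " " (text.toList.map (fun n => pvCMap.getD n ""))] else ret
      if o_rev then
          ret ++ [PySem.Str.join " " (text.toList.reverse.map (fun n => pvCMap.getD n ""))] else ret
    else ret
  ret

-- ===== PORT B =====
-- the `while v >= 4 - i: v -= 4 - i; i += 1` loop; fuel 5 makes it total, exact for
-- the digit values 0..9 reached under Pre_ (at most 3 iterations there)
def pvPairLoop : Nat → Int → Int → Int × Int
  | 0, v, i => (i, i + 1 + v)
  | f + 1, v, i => if v ≥ 4 - i then pvPairLoop f (v - (4 - i)) (i + 1) else (i, i + 1 + v)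

-- one iteration of B's `for d in chars` body; int(d) raises ValueError on a non-digit,
-- ported as ofStr?.getD 0 — exact on Pre_ (only digit characters reach it)
def pvCode (d : Char) (mark : Char) : String :=
  let v : Int := (PySem.Int.ofStr? (String.mk [d])).getD 0
  let p := pvPairLoop 5 v 0
  PySem.Str.join "" ((PySem.List.pyRange 0 6 1).map
    (fun k => if k = p.1 || k = p.2 then String.mk [mark] else "|"))

def pvBars (chars : List Char) (mark : Char) : String :=
  PySem.Str.join " " (chars.foldl (fun out d => out ++ [pvCode d mark]) [])

def do_cypher_alt (text : String) (m_org : Bool) (m_cls : Bool) (o_stght : Bool) (o_rev : Bool) : List String :=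
  [(m_org, '⋅'), (m_cls, ' ')].foldl (fun ret p =>
    if p.1 then
      let ret := if o_stght then ret ++ [pvBars text.toList p.2] else ret
      if o_rev then ret ++ [pvBars text.toList.reverse p.2] else ret
    else ret) []

-- ===== PRECONDITION & SPEC =====
-- Pre_ excludes exactly the inputs where A raises (KeyError on a non-digit character,
-- which is reached iff some output is actually requested by the flags); B raises
-- ValueError (int(d)) on the same inputs.
def Pre_do_cypher (text : String) (m_org : Bool) (m_cls : Bool) (o_stght : Bool) (o_rev : Bool) : Prop :=
  text.toList.all (fun c => decide (c ∈ ['0', '1', '2', '3', '4', '5', '6', '7', '8', '9'])) = true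
  ∨ ((m_org || m_cls) && (o_stght || o_rev)) = false
instance (text : String) (m_org : Bool) (m_cls : Bool) (o_stght : Bool) (o_rev : Bool) : Decidable (Pre_do_cypher text m_org m_cls o_stght o_rev) := by unfold Pre_do_cypher; infer_instance

def pvWitness_do_cypher : String × Bool × Bool × Bool × Bool := ("091", true, true, true, true)

def Spec_do_cypher (text : String) (m_org : Bool) (m_cls : Bool) (o_stght : Bool) (o_rev : Bool) (out : List String) : Prop := out = do_cypher_alt text m_org m_cls o_stght o_rev
instance (text : String) (m_org : Bool) (m_cls : Bool) (o_stght : Bool) (o_rev : Bool) (out : List String) : Decidable (Spec_do_cypher text m_org m_cls o_stght o_rev out) := by unfold Spec_do_cypher; infer_instance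

-- ===== CLAIM (what is proved, stated in full; the proofs are below) =====
def Claim_equal_do_cypher : Prop := ∀ (text : String) (m_org : Bool) (m_cls : Bool) (o_stght : Bool) (o_rev : Bool), Dom_do_cypher text m_org m_cls o_stght o_rev → Pre_do_cypher text m_org m_cls o_stght o_rev → Spec_do_cypher text m_org m_cls o_stght o_rev (do_cypher text m_org m_cls o_stght o_rev)

-- ===== LEMMAS AND PROOFS =====

theorem pvFoldl_append {α β : Type} (f : α → β) :
    ∀ (l : List α) (a : List β), l.foldl (fun out d => out ++ [f d]) a = a ++ l.map f
  | [], a => by simp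
  | x :: t, a => by simp [List.foldl_cons, pvFoldl_append f t (a ++ [f x])]

-- per-digit: B's arithmetic generation reproduces the O_MAP / C_MAP entries
theorem pvCodeO (c : Char) (hc : c ∈ ['0', '1', '2', '3', '4', '5', '6', '7', '8', '9']) :
    pvCode c '⋅' = pvOMap.getD c "" := by fin_cases hc <;> rfl

theorem pvCodeC (c : Char) (hc : c ∈ ['0', '1', '2', '3', '4', '5', '6', '7', '8', '9']) :
    pvCode c ' ' = pvCMap.getD c "" := by fin_cases hc <;> rfl

theorem pvBarsEq (l : List Char) (hl : ∀ c ∈ l, c ∈ ['0', '1', '2', '3', '4', '5', '6', '7', '8', '9']) :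
    pvBars l '⋅' = PySem.Str.join " " (l.map (fun n => pvOMap.getD n ""))
    ∧ pvBars l ' ' = PySem.Str.join " " (l.map (fun n => pvCMap.getD n "")) := by
  constructor
  · unfold pvBars
    rw [pvFoldl_append, List.nil_append]
    exact congrArg (PySem.Str.join " ") (List.map_congr_left (fun c hc => pvCodeO c (hl c hc)))
  · unfold pvBars
    rw [pvFoldl_append, List.nil_append]
    exact congrArg (PySem.Str.join " ") (List.map_congr_left (fun c hc => pvCodeC c (hl c hc)))

-- ===== VERDICT (by name: the statement is the Claim_ definition above) =====
set_option maxRecDepth 20000 in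
theorem do_cypher_spec : Claim_equal_do_cypher := by
  intro text m_org m_cls o_stght o_rev _ hpre
  unfold Spec_do_cypher do_cypher do_cypher_alt
  cases hpre with
  | inl hpre0 =>
    have hpre : ∀ c ∈ text.toList, c ∈ ['0', '1', '2', '3', '4', '5', '6', '7', '8', '9'] := by
      intro c hc
      exact of_decide_eq_true ((List.all_eq_true.mp hpre0) c hc)
    have hpre' : ∀ c ∈ text.toList.reverse, c ∈ ['0', '1', '2', '3', '4', '5', '6', '7', '8', '9'] := by
      intro c hc; exact hpre c (List.mem_reverse.mp hc)
    obtain ⟨hO, hC⟩ := pvBarsEq text.toList hpre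
    obtain ⟨hO', hC'⟩ := pvBarsEq text.toList.reverse hpre'
    cases m_org <;> cases m_cls <;> cases o_stght <;> cases o_rev <;>
      simp [List.foldl_cons, List.foldl_nil, hO, hC, hO', hC']
  | inr hflags =>
    cases m_org <;> cases m_cls <;> cases o_stght <;> cases o_rev <;>
      simp_all [List.foldl_cons, List.foldl_nil]
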